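-- pv_equiv track=rewrite | github.com/ljm0850/algo-problem | baekjoon/1495.py | solution
-- ===== SOURCE A (Python) =====
-- def solution(N:int,S:int,M:int,volume:list[int])->int:
--     volume = [0]+volume
--     dp = [set() for _ in range(N+1)]
--     dp[0].add(S)
--     for i in range(1,N+1):
--         for v in dp[i-1]:
--             if v+volume[i]<=M:
--                 dp[i].add(v+volume[i])
--             if v-volume[i]>=0:
--                 dp[i].add(v-volume[i])
--     if dp[N]:
--         return max(dp[N])
--     else:
--         return -1
-- ===== SOURCE B (Python) =====
-- def solution(N: int, S: int, M: int, volume: list[int]) -> int: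
--     # Top-down: best(i, v) = the maximum final volume attainable when the songs
--     # i..N-1 remain and the current volume is v; -1 if no final volume is attainable.
--     memo = {}
--     def best(i: int, v: int) -> int:
--         if i == N:
--             return v
--         if (i, v) in memo:
--             return memo[(i, v)]
--         res = -1
--         w = volume[i]
--         if v + w <= M:
--             res = best(i + 1, v + w)
--         if v - w >= 0:
--             res = max(res, best(i + 1, v - w))
--         memo[(i, v)] = res
--         return res
--     return best(0, S)
-- ===== Notes on version B (the rewrite author's own statement) =====
-- stated objective: alternative
-- what changed: Replaces A's bottom-up construction of N+1 reachable-volume sets (with a final max over the last set) by a top-down memoized recursion best(i,v) returning the maximum final volume attainable from state (song i, current volume v) directly, with -1 for 'nothing attainable'; no sets are built and no final max pass is needed.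
-- outside the precondition, e.g. on solution(3, -4, -2, [1, -3, 1]): A returns -5, B returns -1
import Mathlib
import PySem

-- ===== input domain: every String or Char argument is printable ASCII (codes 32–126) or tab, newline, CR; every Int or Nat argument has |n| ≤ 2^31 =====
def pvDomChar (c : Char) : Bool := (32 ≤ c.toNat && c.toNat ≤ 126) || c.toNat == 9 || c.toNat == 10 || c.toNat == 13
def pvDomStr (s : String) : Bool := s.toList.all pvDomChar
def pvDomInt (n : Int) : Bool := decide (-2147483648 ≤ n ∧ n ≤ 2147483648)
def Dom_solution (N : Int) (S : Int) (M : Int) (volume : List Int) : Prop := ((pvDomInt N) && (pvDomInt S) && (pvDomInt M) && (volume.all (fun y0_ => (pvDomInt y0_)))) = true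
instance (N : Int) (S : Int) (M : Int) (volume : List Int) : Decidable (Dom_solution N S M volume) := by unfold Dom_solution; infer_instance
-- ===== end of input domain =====

-- B replaces A's bottom-up list of per-song reachable-volume sets by a top-down memoized
-- recursion best(i, v) = maximum final volume attainable from (song i, volume v), -1 if none.

-- ===== PORT A =====
-- literal transliteration of A: dp = list of sets, dp[0] = {S}; set iteration order does not
-- affect the result (dp[i] is a set, the answer is max(dp[N])), so folding the PySem.Set list is exact.
def solution (N : Int) (S : Int) (M : Int) (volume : List Int) : Int :=
  let vol := 0 :: volume                                      -- volume = [0]+volume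
  let dp0 : List (PySem.Set Int) :=
    (PySem.List.pyRange 0 (N+1) 1).map (fun _ => PySem.Set.empty)   -- [set() for _ in range(N+1)]
  let dp1 := PySem.List.pySetD dp0 0
    (PySem.Set.add (PySem.List.pyGetD dp0 0 PySem.Set.empty) S)     -- dp[0].add(S)
  let dp := (PySem.List.pyRange 1 (N+1) 1).foldl (fun dp i =>       -- for i in range(1,N+1):
      PySem.List.pySetD dp i
        ((PySem.List.pyGetD dp (i-1) PySem.Set.empty).foldl         --   for v in dp[i-1]:
          (fun s v =>
            let s := if v + PySem.List.pyGetD vol i 0 ≤ M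
                     then PySem.Set.add s (v + PySem.List.pyGetD vol i 0) else s
            if v - PySem.List.pyGetD vol i 0 ≥ 0
                     then PySem.Set.add s (v - PySem.List.pyGetD vol i 0) else s)
          (PySem.List.pyGetD dp i PySem.Set.empty))) dp1
  let last := PySem.List.pyGetD dp N PySem.Set.empty
  if last ≠ [] then (PySem.List.max? last (fun x => x)).getD (-1) else -1

-- ===== PORT B =====
-- Source B's best(i, v), as the obvious structural recursion on the list of remaining song
-- volumes volume[i:]; the memo dictionary only avoids recomputation and does not change the value.
def solutionBest (M : Int) (vs : List Int) (v : Int) : Int :=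
  match vs with
  | [] => v                                                   -- if i == N: return v
  | w :: rest =>
    let res : Int := -1                                       -- res = -1
    let res := if v + w ≤ M then solutionBest M rest (v + w) else res
    if v - w ≥ 0 then max res (solutionBest M rest (v - w)) else res

-- best(0, S) consumes exactly the first N volumes (Pre_ gives 0 ≤ N ≤ len(volume));
-- outside that range the Python recursion hits an IndexError, excluded by Pre_.
def solution_alt (N : Int) (S : Int) (M : Int) (volume : List Int) : Int :=
  solutionBest M (volume.take N.toNat) S

-- ===== PRECONDITION & SPEC =====
-- Pre_ excludes: N outside [0, len(volume)] (both A and B raise IndexError there), and inputs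
-- where the start volume S is negative AND some of the first N song volumes is negative — both
-- violating the problem's constraints (0 ≤ S, volumes positive); on such invalid input A can
-- return negative "volumes" which B's -1 'nothing attainable' sentinel can absorb — both
-- behaviours on that unspecified corner are defensible.
def Pre_solution (N : Int) (S : Int) (M : Int) (volume : List Int) : Prop :=
  0 ≤ N ∧ N ≤ volume.length ∧ (0 ≤ S ∨ ∀ v ∈ volume.take N.toNat, 0 ≤ v)
instance (N : Int) (S : Int) (M : Int) (volume : List Int) : Decidable (Pre_solution N S M volume) := by unfold Pre_solution; infer_instance
def pvWitness_solution : Int × Int × Int × List Int := (3, 5, 10, [2, 7, 4])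

def Spec_solution (N : Int) (S : Int) (M : Int) (volume : List Int) (out : Int) : Prop := out = solution_alt N S M volume
instance (N : Int) (S : Int) (M : Int) (volume : List Int) (out : Int) : Decidable (Spec_solution N S M volume out) := by unfold Spec_solution; infer_instance

-- ===== CLAIM (what is proved, stated in full; the proofs are below) =====
def Claim_equal_solution : Prop := ∀ (N : Int) (S : Int) (M : Int) (volume : List Int), Dom_solution N S M volume → Pre_solution N S M volume → Spec_solution N S M volume (solution N S M volume)

-- ===== LEMMAS AND PROOFS =====

-- the body of A's inner loop, and one whole inner loop (one song) on a set
def stepF (M vi : Int) (s : PySem.Set Int) (v : Int) : PySem.Set Int :=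
  let s := if v + vi ≤ M then PySem.Set.add s (v + vi) else s
  if v - vi ≥ 0 then PySem.Set.add s (v - vi) else s

def stepS (M vi : Int) (s : PySem.Set Int) : PySem.Set Int :=
  s.foldl (stepF M vi) PySem.Set.empty

-- k is an attainable final volume starting from volume v with songs vs remaining
def Reach (M : Int) (v : Int) (vs : List Int) (k : Int) : Prop :=
  match vs with
  | [] => k = v
  | w :: rest => (v + w ≤ M ∧ Reach M (v + w) rest k) ∨ (0 ≤ v - w ∧ Reach M (v - w) rest k)

-- maximum attainable final volume from v, none if nothing is attainable
def optMax (a b : Option Int) : Option Int :=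
  match a, b with
  | none, b => b
  | some x, none => some x
  | some x, some y => some (max x y)

def optA (M : Int) (v : Int) (vs : List Int) : Option Int :=
  match vs with
  | [] => some v
  | w :: rest =>
    optMax (if v + w ≤ M then optA M (v + w) rest else none)
           (if 0 ≤ v - w then optA M (v - w) rest else none)

-- the set dp[i] after i songs, and the whole dp list after the m-th loop iteration
def iterS (S M : Int) (vs : List Int) (j : Nat) : PySem.Set Int :=
  (vs.take j).foldl (fun s v => stepS M v s) (PySem.Set.add PySem.Set.empty S)

def dpAfter (S M : Int) (vs : List Int) (n m : Nat) : List (PySem.Set Int) :=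
  (List.range (n+1)).map (fun j => if j ≤ m then iterS S M vs j else PySem.Set.empty)

theorem mem_stepF (M vi : Int) (init : PySem.Set Int) (w k : Int) :
    k ∈ stepF M vi init w ↔ k ∈ init ∨ (w + vi = k ∧ k ≤ M) ∨ (w - vi = k ∧ 0 ≤ k) := by
  unfold stepF
  split_ifs with h1 h2 h2
  · simp only [PySem.Set.mem_add]
    constructor
    · rintro ((h | rfl) | rfl)
      · exact Or.inl h
      · exact Or.inr (Or.inl ⟨rfl, h1⟩)
      · exact Or.inr (Or.inr ⟨rfl, h2⟩)
    · rintro (h | ⟨rfl, -⟩ | ⟨rfl, -⟩)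
      · exact Or.inl (Or.inl h)
      · exact Or.inl (Or.inr rfl)
      · exact Or.inr rfl
  · simp only [PySem.Set.mem_add]
    constructor
    · rintro (h | rfl)
      · exact Or.inl h
      · exact Or.inr (Or.inl ⟨rfl, h1⟩)
    · rintro (h | ⟨rfl, -⟩ | ⟨rfl, h⟩)
      · exact Or.inl h
      · exact Or.inr rfl
      · exact absurd h h2
  · simp only [PySem.Set.mem_add]
    constructor
    · rintro (h | rfl)
      · exact Or.inl h
      · exact Or.inr (Or.inr ⟨rfl, h2⟩)
    · rintro (h | ⟨rfl, h⟩ | ⟨rfl, -⟩)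
      · exact Or.inl h
      · exact absurd h h1
      · exact Or.inr rfl
  · constructor
    · exact Or.inl
    · rintro (h | ⟨rfl, h⟩ | ⟨rfl, h⟩)
      · exact h
      · exact absurd h h1
      · exact absurd h h2

theorem mem_foldl_stepF (M vi : Int) (l : List Int) (init : PySem.Set Int) (k : Int) :
    k ∈ l.foldl (stepF M vi) init ↔
      k ∈ init ∨ ∃ w ∈ l, (w + vi = k ∧ k ≤ M) ∨ (w - vi = k ∧ 0 ≤ k) := by
  induction l generalizing init with
  | nil => simp
  | cons w l ih =>
    rw [List.foldl_cons, ih]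
    simp only [List.mem_cons, mem_stepF]
    constructor
    · rintro ((h | hc) | ⟨w', hw', hc⟩)
      · exact Or.inl h
      · exact Or.inr ⟨w, Or.inl rfl, hc⟩
      · exact Or.inr ⟨w', Or.inr hw', hc⟩
    · rintro (h | ⟨w', (rfl | hw'), hc⟩)
      · exact Or.inl (Or.inl h)
      · exact Or.inl (Or.inr hc)
      · exact Or.inr ⟨w', hw', hc⟩

theorem mem_stepS (M vi : Int) (s : PySem.Set Int) (k : Int) :
    k ∈ stepS M vi s ↔ ∃ w ∈ s, (w + vi = k ∧ k ≤ M) ∨ (w - vi = k ∧ 0 ≤ k) := by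
  unfold stepS
  rw [mem_foldl_stepF]
  simp [PySem.Set.empty]

-- members of the forward fold = attainable finals from some member of the start set
theorem mem_fold_stepS (M : Int) (vs : List Int) (s : PySem.Set Int) (k : Int) :
    k ∈ vs.foldl (fun s v => stepS M v s) s ↔ ∃ v ∈ s, Reach M v vs k := by
  induction vs generalizing s with
  | nil => simp [Reach]
  | cons w rest ih =>
    rw [List.foldl_cons, ih]
    constructor
    · rintro ⟨u, hu, hr⟩
      rw [mem_stepS] at hu
      obtain ⟨v, hv, hc⟩ := hu
      refine ⟨v, hv, ?_⟩
      rcases hc with ⟨rfl, hM⟩ | ⟨rfl, h0⟩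
      · exact Or.inl ⟨by omega, hr⟩
      · exact Or.inr ⟨by omega, hr⟩
    · rintro ⟨v, hv, (⟨hM, hr⟩ | ⟨h0, hr⟩)⟩
      · exact ⟨v + w, (mem_stepS M w s _).mpr ⟨v, hv, Or.inl ⟨rfl, hM⟩⟩, hr⟩
      · have hk : 0 ≤ v - w := h0
        exact ⟨v - w, (mem_stepS M w s _).mpr ⟨v, hv, Or.inr ⟨rfl, hk⟩⟩, hr⟩

-- optA is exactly the maximum over Reach (or none if Reach is empty)
theorem optA_spec (M : Int) (vs : List Int) (v : Int) :
    (optA M v vs = none ∧ ∀ k, ¬ Reach M v vs k) ∨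
    (∃ m, optA M v vs = some m ∧ Reach M v vs m ∧ ∀ k, Reach M v vs k → k ≤ m) := by
  induction vs generalizing v with
  | nil =>
    exact Or.inr ⟨v, rfl, rfl, fun k hk => le_of_eq hk⟩
  | cons w rest ih =>
    have hplus := ih (v + w)
    have hminus := ih (v - w)
    by_cases h1 : v + w ≤ M <;> by_cases h2 : 0 ≤ v - w <;>
      simp only [optA, Reach] <;>
      [rw [if_pos h1, if_pos h2]; rw [if_pos h1, if_neg h2];
       rw [if_neg h1, if_pos h2]; rw [if_neg h1, if_neg h2]]
    · -- both branches open
      rcases hplus with ⟨ha, hna⟩ | ⟨ma, ha, hra, hma⟩ <;>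
        rcases hminus with ⟨hb, hnb⟩ | ⟨mb, hb, hrb, hmb⟩
      · rw [ha, hb]
        exact Or.inl ⟨rfl, by rintro k (⟨-, hk⟩ | ⟨-, hk⟩); exacts [hna k hk, hnb k hk]⟩
      · rw [ha, hb]
        refine Or.inr ⟨mb, rfl, Or.inr ⟨h2, hrb⟩, ?_⟩
        rintro k (⟨-, hk⟩ | ⟨-, hk⟩)
        · exact absurd hk (hna k)
        · exact hmb k hk
      · rw [ha, hb]
        refine Or.inr ⟨ma, rfl, Or.inl ⟨h1, hra⟩, ?_⟩
        rintro k (⟨-, hk⟩ | ⟨-, hk⟩)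
        · exact hma k hk
        · exact absurd hk (hnb k)
      · rw [ha, hb]
        refine Or.inr ⟨max ma mb, rfl, ?_, ?_⟩
        · rcases le_total ma mb with h | h
          · rw [max_eq_right h]; exact Or.inr ⟨h2, hrb⟩
          · rw [max_eq_left h]; exact Or.inl ⟨h1, hra⟩
        · rintro k (⟨-, hk⟩ | ⟨-, hk⟩)
          · exact le_trans (hma k hk) (le_max_left _ _)
          · exact le_trans (hmb k hk) (le_max_right _ _)
    · -- only + open
      rcases hplus with ⟨ha, hna⟩ | ⟨ma, ha, hra, hma⟩
      · rw [ha]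
        exact Or.inl ⟨rfl, by rintro k (⟨-, hk⟩ | ⟨hk, -⟩); exacts [hna k hk, h2 hk]⟩
      · rw [ha]
        refine Or.inr ⟨ma, rfl, Or.inl ⟨h1, hra⟩, ?_⟩
        rintro k (⟨-, hk⟩ | ⟨hk, -⟩)
        · exact hma k hk
        · exact absurd hk h2
    · -- only - open
      rcases hminus with ⟨hb, hnb⟩ | ⟨mb, hb, hrb, hmb⟩
      · rw [hb]
        exact Or.inl ⟨rfl, by rintro k (⟨hk, -⟩ | ⟨-, hk⟩); exacts [h1 hk, hnb k hk]⟩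
      · rw [hb]
        refine Or.inr ⟨mb, rfl, Or.inr ⟨h2, hrb⟩, ?_⟩
        rintro k (⟨hk, -⟩ | ⟨-, hk⟩)
        · exact absurd hk h1
        · exact hmb k hk
    · -- both closed
      exact Or.inl ⟨rfl, by rintro k (⟨hk, -⟩ | ⟨hk, -⟩); exacts [h1 hk, h2 hk]⟩

-- with nonnegative volumes, finals attainable from a nonnegative start are nonnegative
theorem reach_nonneg (M : Int) (vs : List Int) (hvs : ∀ w ∈ vs, 0 ≤ w) :
    ∀ v k, 0 ≤ v → Reach M v vs k → 0 ≤ k := by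
  induction vs with
  | nil => intro v k hv hk; rw [Reach] at hk; omega
  | cons w rest ih =>
    intro v k hv hk
    have hw : 0 ≤ w := hvs w (by simp)
    have hrest : ∀ w' ∈ rest, 0 ≤ w' := fun w' hw' => hvs w' (by simp [hw'])
    rcases hk with ⟨-, hk⟩ | ⟨h0, hk⟩
    · exact ih hrest (v + w) k (by omega) hk
    · exact ih hrest (v - w) k (by omega) hk

-- with nonnegative volumes, optA never produces a value below -1
theorem optA_ge (M : Int) (vs : List Int) (hvs : ∀ w ∈ vs, 0 ≤ w) (v : Int) (hv : 0 ≤ v) :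
    optA M v vs = none ∨ ∃ m, optA M v vs = some m ∧ 0 ≤ m := by
  rcases optA_spec M vs v with ⟨h, -⟩ | ⟨m, hm, hr, -⟩
  · exact Or.inl h
  · exact Or.inr ⟨m, hm, reach_nonneg M vs hvs v m hv hr⟩

-- B's recursion computes the maximum attainable final, with -1 for none
theorem solutionBest_eq_optA (M : Int) (vs : List Int) (hvs : ∀ w ∈ vs, 0 ≤ w) (v : Int) :
    solutionBest M vs v = (optA M v vs).getD (-1) := by
  induction vs generalizing v with
  | nil => rfl
  | cons w rest ih =>
    have hw : 0 ≤ w := hvs w (by simp)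
    have hrest : ∀ w' ∈ rest, 0 ≤ w' := fun w' hw' => hvs w' (by simp [hw'])
    have ihp := ih hrest (v + w)
    have ihm := ih hrest (v - w)
    by_cases h1 : v + w ≤ M <;> by_cases h2 : 0 ≤ v - w <;>
      simp only [solutionBest, optA, h1, h2, ge_iff_le, if_true, if_false,
        ite_true, ite_false, if_pos, if_neg, not_false_iff]
    · -- both branches open: v ≥ w ≥ 0, so both optA values are none or nonnegative
      rw [ihp, ihm]
      rcases optA_ge M rest hrest (v + w) (by omega) with ha | ⟨ma, ha, hma⟩ <;>
        rcases optA_ge M rest hrest (v - w) (by omega) with hb | ⟨mb, hb, hmb⟩ <;>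
        rw [ha, hb] <;> simp [optMax] <;> omega
    · -- only +: res is returned as-is, no max is taken
      rw [ihp]
      rcases optA M (v + w) rest with _ | ma <;> simp [optMax]
    · -- only -: v ≥ w ≥ 0, the - branch value is none or nonnegative
      rw [ihm]
      rcases optA_ge M rest hrest (v - w) (by omega) with hb | ⟨mb, hb, hmb⟩ <;>
        rw [hb] <;> simp [optMax] <;> omega
    · rfl

theorem optMax_none {a b : Option Int} (h : optMax a b = none) : a = none ∧ b = none := by
  cases a <;> cases b <;> simp_all [optMax]

-- how a value of optA at a cons decomposes over the two branches
theorem optA_cons_cases (M w : Int) (rest : List Int) (v m : Int)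
    (h : optA M v (w :: rest) = some m) :
    (∃ m2, 0 ≤ v - w ∧ optA M (v - w) rest = some m2 ∧ m2 ≤ m) ∨
    ((v + w ≤ M ∧ optA M (v + w) rest = some m) ∧
      (¬ 0 ≤ v - w ∨ optA M (v - w) rest = none)) := by
  rw [optA] at h
  by_cases h1 : v + w ≤ M <;> by_cases h2 : 0 ≤ v - w
  · rw [if_pos h1, if_pos h2] at h
    cases ha : optA M (v + w) rest with
    | none =>
      rw [ha] at h
      cases hb : optA M (v - w) rest with
      | none => rw [hb] at h; simp [optMax] at h
      | some m2 =>
        rw [hb] at h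
        simp only [optMax, Option.some_inj] at h
        exact Or.inl ⟨m2, h2, rfl, by omega⟩
    | some m1 =>
      rw [ha] at h
      cases hb : optA M (v - w) rest with
      | none =>
        rw [hb] at h
        simp only [optMax, Option.some_inj] at h
        exact Or.inr ⟨⟨h1, (by rw [h])⟩, Or.inr rfl⟩
      | some m2 =>
        rw [hb] at h
        simp only [optMax, Option.some_inj] at h
        exact Or.inl ⟨m2, h2, rfl, by omega⟩
  · rw [if_pos h1, if_neg h2] at h
    cases ha : optA M (v + w) rest with
    | none => rw [ha] at h; simp [optMax] at h
    | some m1 =>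
      rw [ha] at h
      simp only [optMax, Option.some_inj] at h
      exact Or.inr ⟨⟨h1, (by rw [h])⟩, Or.inl h2⟩
  · rw [if_neg h1, if_pos h2] at h
    cases hb : optA M (v - w) rest with
    | none => rw [hb] at h; simp [optMax] at h
    | some m2 =>
      rw [hb] at h
      simp only [optMax, Option.some_inj] at h
      exact Or.inl ⟨m2, h2, rfl, by omega⟩
  · rw [if_neg h1, if_neg h2] at h
    simp [optMax] at h

-- from a nonnegative start, the maximum attainable final volume is never negative; the
-- companion pair statement carries the induction through negative intermediate states
theorem optA_pos_max (M : Int) (vs : List Int) :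
    (∀ v m, 0 ≤ v → optA M v vs = some m → 0 ≤ m) ∧
    (∀ u x m, 0 ≤ u → 0 ≤ u + x → optA M u vs = none → optA M x vs = some m → 0 ≤ m) := by
  induction vs with
  | nil =>
    constructor
    · intro v m hv h
      simp only [optA, Option.some_inj] at h
      omega
    · intro u x m _ _ h _
      simp only [optA, reduceCtorEq] at h
  | cons w rest ih =>
    obtain ⟨ihQ, ihS⟩ := ih
    constructor
    · intro v m hv h
      rcases optA_cons_cases M w rest v m h with ⟨m2, h2, hb, hle⟩ | ⟨⟨h1, ha⟩, hdeadb⟩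
      · have := ihQ (v - w) m2 h2 hb
        omega
      · by_cases hc : 0 ≤ v + w
        · exact ihQ (v + w) m hc ha
        · -- v + w < 0 with v ≥ 0 forces w < 0, so the minus branch was open but dead
          have h2 : 0 ≤ v - w := by omega
          rcases hdeadb with h2' | hbdead
          · exact absurd h2 h2'
          · exact ihS (v - w) (v + w) m h2 (by omega) hbdead ha
    · intro u x m hu hs hdead h
      rw [optA] at hdead
      obtain ⟨hdp, hdm⟩ := optMax_none hdead
      rcases optA_cons_cases M w rest x m h with ⟨m2, h2, hb, hle⟩ | ⟨⟨h1, ha⟩, -⟩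
      · have := ihQ (x - w) m2 h2 hb
        omega
      · by_cases hc : 0 ≤ x + w
        · exact ihQ (x + w) m hc ha
        · -- x + w < 0 gives w < -x ≤ u, so u's minus branch was open; deadness passes down
          have h2u : 0 ≤ u - w := by omega
          rw [if_pos h2u] at hdm
          exact ihS (u - w) (x + w) m h2u (by omega) hdm ha

-- B's recursion either computes the maximum attainable final exactly, or returns -1 while the
-- true maximum is below -1 (possible only through negative intermediate states)
theorem solutionBest_getD (M : Int) (vs : List Int) :
    ∀ v, solutionBest M vs v = (optA M v vs).getD (-1) ∨
      (solutionBest M vs v = -1 ∧ ∃ m, optA M v vs = some m ∧ m < -1) := by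
  induction vs with
  | nil => intro v; exact Or.inl rfl
  | cons w rest ih =>
    intro v
    have hQ := (optA_pos_max M rest).1
    by_cases h1 : v + w ≤ M <;> by_cases h2 : 0 ≤ v - w <;>
      simp only [solutionBest, optA, h1, h2, ge_iff_le, if_true, if_false, not_false_iff,
        ite_true, ite_false, if_pos, if_neg]
    · -- both branches open; the minus branch starts at a nonnegative state and never floors
      have hm : solutionBest M rest (v - w) = (optA M (v - w) rest).getD (-1) := by
        rcases ih (v - w) with h | ⟨-, m, hO, hmlt⟩
        · exact h
        · exact absurd (hQ (v - w) m h2 hO) (by omega)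
      rcases ih (v + w) with hp | ⟨hpB, m1, hpO, hm1⟩
      · cases ha : optA M (v + w) rest with
        | none =>
          rw [ha] at hp
          cases hb : optA M (v - w) rest with
          | none => rw [hb] at hm; rw [hp, hm]; left; simp [optMax]
          | some m2 =>
            have hm2 : 0 ≤ m2 := hQ (v - w) m2 h2 hb
            rw [hb] at hm; rw [hp, hm]; left; simp [optMax]; omega
        | some m1 =>
          rw [ha] at hp
          cases hb : optA M (v - w) rest with
          | none =>
            rw [hb] at hm; rw [hp, hm]
            by_cases hge : -1 ≤ m1
            · left; simp [optMax]; omega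
            · right
              refine ⟨by simp; omega, m1, by simp [optMax], by omega⟩
          | some m2 =>
            have hm2 : 0 ≤ m2 := hQ (v - w) m2 h2 hb
            rw [hb] at hm; rw [hp, hm]; left; simp [optMax]
      · -- plus branch floored: its true maximum is below -1
        cases hb : optA M (v - w) rest with
        | none =>
          rw [hb] at hm; rw [hpB, hm]; right
          refine ⟨by simp, m1, ?_, hm1⟩
          simp [hpO, optMax]
        | some m2 =>
          have hm2 : 0 ≤ m2 := hQ (v - w) m2 h2 hb
          rw [hb] at hm; rw [hpB, hm]; left
          simp [hpO, optMax]; omega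
    · -- only plus open: the branch value is passed through unchanged
      rcases ih (v + w) with hp | ⟨hpB, m1, hpO, hm1⟩
      · left
        rw [hp]
        cases ha : optA M (v + w) rest with
        | none => simp [optMax]
        | some m1 => simp [optMax]
      · right
        rw [hpO]
        exact ⟨hpB, m1, by simp [optMax], hm1⟩
    · -- only minus open
      have hm : solutionBest M rest (v - w) = (optA M (v - w) rest).getD (-1) := by
        rcases ih (v - w) with h | ⟨-, m, hO, hmlt⟩
        · exact h
        · exact absurd (hQ (v - w) m h2 hO) (by omega)
      cases hb : optA M (v - w) rest with
      | none => rw [hb] at hm; rw [hm]; left; simp [optMax]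
      | some m2 =>
        have hm2 : 0 ≤ m2 := hQ (v - w) m2 h2 hb
        rw [hb] at hm; rw [hm]; left; simp [optMax]; omega
    · left; simp [optMax]

-- for a nonnegative start volume the flooring case of solutionBest_getD cannot occur
theorem solutionBest_eq_getD_nonneg_start (M : Int) (vs : List Int) (S : Int) (hS : 0 ≤ S) :
    solutionBest M vs S = (optA M S vs).getD (-1) := by
  rcases solutionBest_getD M vs S with h | ⟨-, m, hO, hm⟩
  · exact h
  · exact absurd ((optA_pos_max M vs).1 S m hS hO) (by omega)

-- A computes the fold of stepS along the first n volumes (Nat form)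
theorem solution_eq_fold_nat (n : Nat) (S M : Int) (volume : List Int)
    (h1 : n ≤ volume.length) :
    solution (n : Int) S M volume =
      (if (volume.take n).foldl (fun s v => stepS M v s)
            (PySem.Set.add PySem.Set.empty S) ≠ [] then
        (PySem.List.max? ((volume.take n).foldl (fun s v => stepS M v s)
            (PySem.Set.add PySem.Set.empty S)) (fun x => x)).getD (-1)
       else -1) := by
  simp only [solution]
  have hdp0 : (PySem.List.pyRange 0 ((n : Int)+1) 1).map
      (fun _ => (PySem.Set.empty : PySem.Set Int)) =
      (List.range (n+1)).map (fun _ => (PySem.Set.empty : PySem.Set Int)) := by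
    rw [PySem.List.pyRange_one]
    have e1 : (((n : Int)+1) - 0).toNat = n + 1 := by omega
    rw [e1, List.map_map]
    rfl
  rw [hdp0]
  have hget0 : PySem.List.pyGetD ((List.range (n+1)).map
      (fun _ => (PySem.Set.empty : PySem.Set Int))) 0 PySem.Set.empty = PySem.Set.empty := by
    rw [PySem.List.pyGetD_zero, PySem.List.getD_map_range _ _ _ _ (by omega)]
  rw [hget0]
  have hdp1 : PySem.List.pySetD ((List.range (n+1)).map
        (fun _ => (PySem.Set.empty : PySem.Set Int))) 0
        (PySem.Set.add PySem.Set.empty S) = dpAfter S M (volume.take n) n 0 := by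
    rw [show (0:Int) = ((0:Nat):Int) from rfl, PySem.List.pySetD_natCast]
    apply List.ext_getElem
    · simp [dpAfter]
    · intro i hi hi'
      simp only [dpAfter, List.getElem_set, List.getElem_map, List.getElem_range]
      by_cases h0 : i = 0
      · subst h0
        simp [iterS]
      · rw [if_neg (by omega), if_neg (by omega)]
  rw [hdp1]
  have key : ∀ m : Nat, m ≤ n →
      (PySem.List.pyRange 1 ((m : Int)+1) 1).foldl (fun dp i =>
        PySem.List.pySetD dp i
          ((PySem.List.pyGetD dp (i-1) PySem.Set.empty).foldl
            (fun s v =>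
              let s := if v + PySem.List.pyGetD (0 :: volume) i 0 ≤ M
                       then PySem.Set.add s (v + PySem.List.pyGetD (0 :: volume) i 0) else s
              if v - PySem.List.pyGetD (0 :: volume) i 0 ≥ 0
                       then PySem.Set.add s (v - PySem.List.pyGetD (0 :: volume) i 0) else s)
            (PySem.List.pyGetD dp i PySem.Set.empty)))
        (dpAfter S M (volume.take n) n 0) = dpAfter S M (volume.take n) n m := by
    intro m
    induction m with
    | zero =>
      intro _
      rw [PySem.List.pyRange_one_eq_nil (by norm_num)]
      rfl
    | succ m ih =>
      intro hm
      have hmn : m ≤ n := by omega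
      have hcast : ((m + 1 : Nat) : Int) + 1 = (((m : Int) + 1) + 1) := by push_cast; ring
      rw [hcast, PySem.List.pyRange_one_succ_right (by omega), List.foldl_append,
        ih hmn]
      simp only [List.foldl_cons, List.foldl_nil]
      -- evaluate the body at i = (m:Int)+1
      have hi1 : ((m : Int) + 1) - 1 = (m : Int) := by ring
      have hgetm : PySem.List.pyGetD (dpAfter S M (volume.take n) n m) (m : Int)
          PySem.Set.empty = iterS S M (volume.take n) m := by
        rw [PySem.List.pyGetD_natCast]
        simp only [dpAfter]
        rw [PySem.List.getD_map_range _ _ _ _ (by omega)]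
        simp
      have hcast1 : ((m : Int) + 1) = ((m + 1 : Nat) : Int) := by push_cast; ring
      have hgetm1 : PySem.List.pyGetD (dpAfter S M (volume.take n) n m)
          ((m : Int) + 1) PySem.Set.empty = PySem.Set.empty := by
        rw [hcast1, PySem.List.pyGetD_natCast]
        simp only [dpAfter]
        rw [PySem.List.getD_map_range _ _ _ _ (by omega), if_neg (by omega)]
      have hvol : PySem.List.pyGetD (0 :: volume) ((m : Int) + 1) 0 =
          (volume.take n)[m]'(by simp; omega) := by
        rw [hcast1, PySem.List.pyGetD_natCast, List.getD_cons_succ,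
          List.getD_eq_getElem volume 0 (by omega), List.getElem_take]
      rw [hi1, hgetm, hgetm1, hvol]
      -- the inner fold is one more stepS, extending iterS by one song
      have hinner : (iterS S M (volume.take n) m).foldl
          (fun s v =>
            let s := if v + (volume.take n)[m]'(by simp; omega) ≤ M
                     then PySem.Set.add s (v + (volume.take n)[m]'(by simp; omega)) else s
            if v - (volume.take n)[m]'(by simp; omega) ≥ 0
                     then PySem.Set.add s (v - (volume.take n)[m]'(by simp; omega)) else s)
          PySem.Set.empty = iterS S M (volume.take n) (m+1) := by
        have hstep : iterS S M (volume.take n) (m+1) =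
            stepS M ((volume.take n)[m]'(by simp; omega)) (iterS S M (volume.take n) m) := by
          unfold iterS
          rw [List.take_add_one]
          have hsome : (volume.take n)[m]? = some ((volume.take n)[m]'(by simp; omega)) :=
            List.getElem?_eq_getElem (by simp; omega)
          rw [hsome]
          simp [List.foldl_append]
        rw [hstep]
        rfl
      rw [hinner]
      -- writing at index m+1 turns dpAfter m into dpAfter (m+1)
      rw [hcast1, PySem.List.pySetD_natCast]
      apply List.ext_getElem
      · simp [dpAfter]
      · intro i hi hi'
        simp only [dpAfter, List.getElem_set, List.getElem_map, List.getElem_range]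
        by_cases hieq : i = m + 1
        · subst hieq
          simp
        · rw [if_neg (by omega)]
          by_cases hile : i ≤ m
          · rw [if_pos hile, if_pos (by omega)]
          · rw [if_neg hile, if_neg (by omega)]
  rw [key n le_rfl]
  have hlast : PySem.List.pyGetD (dpAfter S M (volume.take n) n n) (n : Int)
      PySem.Set.empty = (volume.take n).foldl (fun s v => stepS M v s)
        (PySem.Set.add PySem.Set.empty S) := by
    rw [PySem.List.pyGetD_natCast]
    simp only [dpAfter]
    rw [PySem.List.getD_map_range _ _ _ _ (by omega), if_pos le_rfl]
    unfold iterS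
    rw [List.take_take, min_self]
  rw [hlast]

theorem solution_eq_fold (N S M : Int) (volume : List Int)
    (h0 : 0 ≤ N) (h1 : N ≤ volume.length) :
    solution N S M volume =
      (if (volume.take N.toNat).foldl (fun s v => stepS M v s)
            (PySem.Set.add PySem.Set.empty S) ≠ [] then
        (PySem.List.max? ((volume.take N.toNat).foldl (fun s v => stepS M v s)
            (PySem.Set.add PySem.Set.empty S)) (fun x => x)).getD (-1)
       else -1) := by
  have hN : N = ((N.toNat : Nat) : Int) := by omega
  rw [hN]
  exact solution_eq_fold_nat N.toNat S M volume (by omega)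

-- ===== VERDICT (by name: the statement is the Claim_ definition above) =====
theorem solution_spec : Claim_equal_solution := by
  intro N S M volume _hDom hPre
  obtain ⟨h0, h1, hvs⟩ := hPre
  show solution N S M volume = solution_alt N S M volume
  set vs := volume.take N.toNat with hvsdef
  rw [solution_eq_fold N S M volume h0 h1]
  have hBS : solutionBest M vs S = (optA M S vs).getD (-1) := by
    rcases hvs with hS | hvols
    · exact solutionBest_eq_getD_nonneg_start M vs S hS
    · exact solutionBest_eq_optA M vs hvols S
  rw [show solution_alt N S M volume = solutionBest M vs S from rfl, hBS]
  set F := vs.foldl (fun s v => stepS M v s) (PySem.Set.add PySem.Set.empty S) with hF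
  have hmem : ∀ k, k ∈ F ↔ Reach M S vs k := by
    intro k
    rw [hF, mem_fold_stepS]
    simp [PySem.Set.empty]
  rcases optA_spec M vs S with ⟨hnone, hnr⟩ | ⟨m, hsome, hr, hmax⟩
  · -- nothing attainable: F is empty, both sides are -1
    have hFnil : F = [] := by
      rw [List.eq_nil_iff_forall_not_mem]
      intro k hk
      exact hnr k ((hmem k).mp hk)
    rw [hnone, if_neg (by simp [hFnil])]
    rfl
  · -- m is the maximum attainable final: max(F) = m
    have hFne : F ≠ [] := fun hnil => by
      have := (hmem m).mpr hr
      rw [hnil] at this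
      simp at this
    rw [hsome, if_pos hFne, Option.getD_some]
    obtain ⟨m0, hm0⟩ : ∃ m0, PySem.List.max? F (fun x => x) = some m0 := by
      cases hmax? : PySem.List.max? F (fun x => x) with
      | none => exact absurd ((PySem.List.max?_eq_none_iff F _).mp hmax?) hFne
      | some m0 => exact ⟨m0, rfl⟩
    rw [hm0, Option.getD_some]
    have hm0F : m0 ∈ F := PySem.List.max?_mem hm0
    have hm0max : ∀ y ∈ F, y ≤ m0 := PySem.List.max?_isMax hm0
    have h1' : m0 ≤ m := hmax m0 ((hmem m0).mp hm0F)
    have h2' : m ≤ m0 := hm0max m ((hmem m).mpr hr)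
    omega
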